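-- pv_equiv track=rewrite | github.com/partho-maple/coding-interview-gym | leetcode.com/python/1102_Path_With_Maximum_Minimum_Value.py | maximumMinimumPath
-- ===== SOURCE A (Python) =====
-- import heapq
--
-- def maximumMinimumPath(A):
--     """
--     :type A: List[List[int]]
--     :rtype: int
--     """
--     visiitedSet = set()
--     visiitedSet.add((0, 0))
--     rowCount, colCount = len(A), len(A[0])
--     maxMin = float("inf")
--     maxHeap = [(-A[0][0], 0, 0)]
--     while maxHeap:
--         val, r, c = heapq.heappop(maxHeap)
--         originalVal = -val
--         maxMin = min(originalVal, maxMin)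
--         if r == rowCount - 1 and c == colCount - 1:
--             return maxMin
--
--         neighbours = [(-1, 0), (0, 1), (1, 0), (0, -1)]
--         for neighbour in neighbours:
--             dr, dc = neighbour[0], neighbour[1]
--             newR, newC = r + dr, c + dc
--             if 0 <= newR < len(A) and 0 <= newC < len(A[0]) and ((newR, newC) not in visiitedSet):
--                 visiitedSet.add((newR, newC))
--                 heapq.heappush(maxHeap, (-A[newR][newC], newR, newC))
--     return maxMin
-- ===== SOURCE B (Python) =====
-- def maximumMinimumPath(A):
--     """
--     :type A: List[List[int]]
--     :rtype: int
--     """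
--     rows, cols = len(A), len(A[0])
--     seen = {(0, 0)}
--     frontier = [(-A[0][0], 0, 0)]
--     best = A[0][0]
--     # Best-first search with a plain list as the priority queue: pop the
--     # smallest (-value, r, c) triple with min()/remove().  The grid is
--     # 4-connected, so the bottom-right corner is always reached.
--     while True:
--         item = min(frontier)
--         frontier.remove(item)
--         negval, r, c = item
--         best = min(best, -negval)
--         if r == rows - 1 and c == cols - 1:
--             return best
--         for nr, nc in ((r - 1, c), (r, c + 1), (r + 1, c), (r, c - 1)):
--             if 0 <= nr < rows and 0 <= nc < cols and (nr, nc) not in seen: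
--                 seen.add((nr, nc))
--                 frontier.append((-A[nr][nc], nr, nc))
-- ===== Notes on version B (the rewrite author's own statement) =====
-- stated objective: simpler
-- what changed: B drops the heapq binary heap and keeps the frontier as a plain list, extracting the best cell with min()/remove() and tracking the running minimum in a plain int; Pre_ excludes empty/too-ragged grids on which A raises IndexError (or returns only by accident of traversal order).
-- outside the precondition, e.g. on maximumMinimumPath([[0, 2, 0], [2, 0], [2, 2, 3]]): A returns 0, B returns 0
import Mathlib
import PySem

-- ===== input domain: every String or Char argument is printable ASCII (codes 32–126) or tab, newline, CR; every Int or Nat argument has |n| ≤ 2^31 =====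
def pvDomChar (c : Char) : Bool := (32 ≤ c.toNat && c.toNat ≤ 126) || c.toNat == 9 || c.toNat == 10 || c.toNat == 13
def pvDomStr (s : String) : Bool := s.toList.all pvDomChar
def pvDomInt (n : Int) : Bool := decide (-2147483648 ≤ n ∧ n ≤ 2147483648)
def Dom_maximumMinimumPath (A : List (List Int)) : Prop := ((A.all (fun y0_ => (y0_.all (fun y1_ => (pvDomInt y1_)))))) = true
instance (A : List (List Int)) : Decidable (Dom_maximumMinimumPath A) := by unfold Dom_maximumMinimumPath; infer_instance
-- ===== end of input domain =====

-- B replaces A's binary max-heap (hand-rolled heapq) by a plain frontier list whose best entry is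
-- extracted with min()/remove(): an alternative decomposition of the same best-first search.

-- ===== PORT A =====
-- A's heap elements are Python triples (−value, row, col); Python's tuple '<' is lexicographic:
abbrev Tri : Type := Int × Int × Int

def tupLt (a b : Tri) : Bool :=
  if a.1 < b.1 then true else if b.1 < a.1 then false
  else if a.2.1 < b.2.1 then true else if b.2.1 < a.2.1 then false
  else decide (a.2.2 < b.2.2)

-- heap[i] (indices produced by heapq are always in range; default is never read under Pre_)
def hGet (l : List Tri) (i : Nat) : Tri := l.getD i (0, 0, 0)

-- hand port of CPython heapq._siftdown(heap, startpos, pos) — exact step for step; the local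
-- names parentpos = (pos-1)>>1 and parent = heap[parentpos] are inlined
-- (newitem = heap[pos] is read once by the wrapper below, as in CPython)
def siftdownGo (l : List Tri) (startpos pos : Nat) (newitem : Tri) : List Tri :=
  if h : startpos < pos then
    if tupLt newitem (hGet l ((pos - 1) / 2)) then
      siftdownGo (l.set pos (hGet l ((pos - 1) / 2))) startpos ((pos - 1) / 2) newitem
    else l.set pos newitem
  else l.set pos newitem
termination_by pos
decreasing_by omega

def siftdown (l : List Tri) (startpos pos : Nat) : List Tri :=
  siftdownGo l startpos pos (hGet l pos)

-- hand port of CPython heapq._siftup(heap, pos): phase 1 moves the smaller child up to a leaf;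
-- childpos = 2*pos+1, rightpos = childpos+1, and 'if rightpos < endpos and not heap[childpos] <
-- heap[rightpos]: childpos = rightpos' is the child selection below, inlined
def siftupChild (l : List Tri) (pos endpos : Nat) : Nat :=
  if 2 * pos + 2 < endpos ∧ tupLt (hGet l (2 * pos + 1)) (hGet l (2 * pos + 2)) = false then
    2 * pos + 2
  else 2 * pos + 1

def siftupGo (l : List Tri) (pos endpos : Nat) : List Tri × Nat :=
  if _h : 2 * pos + 1 < endpos then
    siftupGo (l.set pos (hGet l (siftupChild l pos endpos))) (siftupChild l pos endpos) endpos
  else (l, pos)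
termination_by endpos - pos
decreasing_by simp only [siftupChild]; split <;> omega

-- … then writes newitem at the leaf and bubbles it up with _siftdown (exact);
-- endpos = len(heap), startpos = pos, newitem = heap[pos]
def siftup (l : List Tri) (pos : Nat) : List Tri :=
  siftdownGo ((siftupGo l pos l.length).1.set (siftupGo l pos l.length).2 (hGet l pos))
    pos (siftupGo l pos l.length).2 (hGet l pos)

-- heapq.heappush: append, then _siftdown(heap, 0, len(heap)-1)
def heappush (l : List Tri) (item : Tri) : List Tri :=
  siftdown (l ++ [item]) 0 l.length

-- heapq.heappop: pop the last element (lastelt = heap[len-1], rest = heap[:-1], inlined);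
-- if the rest is nonempty put lastelt at the root and _siftup(heap, 0)
def heappop (l : List Tri) : Tri × List Tri :=
  if l.dropLast.isEmpty then (hGet l (l.length - 1), [])
  else (hGet l.dropLast 0, siftup (l.dropLast.set 0 (hGet l (l.length - 1))) 0)

-- A[r][c] for in-range nonnegative indices (total form; in range whenever A's Python returns)
def aGrid (A : List (List Int)) (r c : Int) : Int :=
  PySem.List.pyGetD (PySem.List.pyGetD A r []) c 0

-- the 'for neighbour in neighbours' body: push each unvisited in-bounds neighbour
def aStep (A : List (List Int)) (r c : Int)
    (st : PySem.Set (Int × Int) × List Tri) : PySem.Set (Int × Int) × List Tri :=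
  ([((-1 : Int), (0 : Int)), (0, 1), (1, 0), (0, -1)]).foldl
    (fun st dd =>
      let newR := r + dd.1
      let newC := c + dd.2
      if 0 ≤ newR ∧ newR < (A.length : Int) ∧ 0 ≤ newC ∧ newC < ((A.headD []).length : Int)
          ∧ ¬ ((newR, newC) ∈ st.1) then
        (PySem.Set.add st.1 (newR, newC), heappush st.2 (-(aGrid A newR newC), newR, newC))
      else st) st

-- the while loop; maxMin : Option Int (none = float("inf"), only before the first pop);
-- fuel only makes the recursion structural — each iteration pops one element and every cell is
-- pushed at most once, so rows*cols+1 iterations are never exhausted where A's Python returns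
def aLoop (A : List (List Int)) :
    Nat → PySem.Set (Int × Int) → Option Int → List Tri → Option Int
  | 0, _, maxMin, _ => maxMin
  | fuel + 1, visited, maxMin, maxHeap =>
    if maxHeap.isEmpty then maxMin
    else
      let p := heappop maxHeap
      let originalVal := -(p.1.1)
      let maxMin' := some (match maxMin with | none => originalVal | some m => min originalVal m)
      if p.1.2.1 = (A.length : Int) - 1 ∧ p.1.2.2 = ((A.headD []).length : Int) - 1 then maxMin'
      else
        let st := aStep A p.1.2.1 p.1.2.2 (visited, p.2)
        aLoop A fuel st.1 maxMin' st.2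

def maximumMinimumPath (A : List (List Int)) : Int :=
  (aLoop A (A.length * (A.headD []).length + 1)
      (PySem.Set.add PySem.Set.empty ((0 : Int), (0 : Int))) none
      [(-(aGrid A 0 0), 0, 0)]).getD 0

-- ===== PORT B =====
def bGrid (A : List (List Int)) (r c : Int) : Int :=
  PySem.List.pyGetD (PySem.List.pyGetD A r []) c 0

-- min(frontier): CPython min with no key — first element as the running value, then a left scan
-- comparing with tuple '<' (exact); [] would raise ValueError, unreachable under Pre_
def bMin (l : List Tri) : Tri :=
  match l with
  | [] => (0, 0, 0)
  | h :: t => t.foldl (fun m x => if tupLt x m then x else m) h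

-- the 'for nr, nc in ((r-1,c),(r,c+1),(r+1,c),(r,c-1))' body: append unseen in-bounds neighbours
def bStep (A : List (List Int)) (r c : Int)
    (st : PySem.Set (Int × Int) × List Tri) : PySem.Set (Int × Int) × List Tri :=
  ([(r - 1, c), (r, c + 1), (r + 1, c), (r, c - 1)]).foldl
    (fun st nrc =>
      let nr := nrc.1
      let nc := nrc.2
      if 0 ≤ nr ∧ nr < (A.length : Int) ∧ 0 ≤ nc ∧ nc < ((A.headD []).length : Int)
          ∧ ¬ ((nr, nc) ∈ st.1) then
        (PySem.Set.add st.1 (nr, nc), st.2 ++ [(-(bGrid A nr nc), nr, nc)])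
      else st) st

-- the 'while True' loop; same structural fuel as A's port (the corner is always reached within
-- rows*cols pops, so the fuel is never exhausted where B's Python returns); the isEmpty guard is
-- only totality for the unreachable min([])/ValueError case
def bLoop (A : List (List Int)) :
    Nat → PySem.Set (Int × Int) → Int → List Tri → Int
  | 0, _, best, _ => best
  | fuel + 1, seen, best, frontier =>
    if frontier.isEmpty then best
    else
      let item := bMin frontier
      let frontier' := (PySem.List.remove? frontier item).getD frontier  -- frontier.remove(item)
      let best' := min best (-(item.1))
      if item.2.1 = (A.length : Int) - 1 ∧ item.2.2 = ((A.headD []).length : Int) - 1 then best'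
      else
        let st := bStep A item.2.1 item.2.2 (seen, frontier')
        bLoop A fuel st.1 best' st.2

def maximumMinimumPath_alt (A : List (List Int)) : Int :=
  bLoop A (A.length * (A.headD []).length + 1)
    (PySem.Set.add PySem.Set.empty ((0 : Int), (0 : Int))) (bGrid A 0 0)
    [(-(bGrid A 0 0), 0, 0)]

-- ===== PRECONDITION & SPEC =====
-- Pre_ excludes the empty grid / empty first row (A raises IndexError at A[0][0]) and grids
-- having a row shorter than row 0: there A almost always raises IndexError, except that on a few
-- such grids the search happens to return before touching the missing cells — an accident of the
-- traversal order, so those ragged grids are excluded as a whole.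
def Pre_maximumMinimumPath (A : List (List Int)) : Prop :=
  A ≠ [] ∧ A.headD [] ≠ [] ∧ ∀ row ∈ A, (A.headD []).length ≤ row.length
instance (A : List (List Int)) : Decidable (Pre_maximumMinimumPath A) := by
  unfold Pre_maximumMinimumPath; infer_instance

def pvWitness_maximumMinimumPath : List (List Int) := [[5, 4, 5], [1, 2, 6], [7, 4, 6]]

def Spec_maximumMinimumPath (A : List (List Int)) (out : Int) : Prop := out = maximumMinimumPath_alt A
instance (A : List (List Int)) (out : Int) : Decidable (Spec_maximumMinimumPath A out) := by
  unfold Spec_maximumMinimumPath; infer_instance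

-- ===== CLAIM (what is proved, stated in full; the proofs are below) =====
def Claim_equal_maximumMinimumPath : Prop :=
  ∀ (A : List (List Int)), Dom_maximumMinimumPath A → Pre_maximumMinimumPath A →
    Spec_maximumMinimumPath A (maximumMinimumPath A)

-- ===== LEMMAS AND PROOFS =====

lemma tupLt_iff (a b : Tri) : tupLt a b = true ↔
    (a.1 < b.1 ∨ (a.1 = b.1 ∧ (a.2.1 < b.2.1 ∨ (a.2.1 = b.2.1 ∧ a.2.2 < b.2.2)))) := by
  unfold tupLt; split_ifs <;> simp <;> omega

lemma tupLt_false_iff (a b : Tri) : tupLt a b = false ↔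
    ¬ (a.1 < b.1 ∨ (a.1 = b.1 ∧ (a.2.1 < b.2.1 ∨ (a.2.1 = b.2.1 ∧ a.2.2 < b.2.2)))) := by
  rw [← tupLt_iff]; simp

lemma tupLt_irrefl (a : Tri) : tupLt a a = false := by
  rw [tupLt_false_iff]; omega

lemma tupLt_asymm {a b : Tri} (h : tupLt a b = true) : tupLt b a = false := by
  rw [tupLt_iff] at h; rw [tupLt_false_iff]; omega

lemma tupLt_eq_of_notLt_of_notLt {a b : Tri} (h1 : tupLt a b = false) (h2 : tupLt b a = false) :
    a = b := by
  rw [tupLt_false_iff] at h1 h2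
  obtain ⟨a1, a2, a3⟩ := a; obtain ⟨b1, b2, b3⟩ := b
  simp only [Prod.mk.injEq]; simp only [] at h1 h2; omega

lemma notLt_trans {a b c : Tri} (h1 : tupLt b a = false) (h2 : tupLt c b = false) :
    tupLt c a = false := by
  rw [tupLt_false_iff] at h1 h2 ⊢; omega

lemma tupLt_false_of_lt_of_notLt {n p s : Tri} (h1 : tupLt n p = true) (h2 : tupLt s p = false) :
    tupLt s n = false := by
  rw [tupLt_iff] at h1; rw [tupLt_false_iff] at h2 ⊢; omega

lemma hGet_eq_getElem (l : List Tri) {i : Nat} (h : i < l.length) : hGet l i = l[i] :=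
  List.getD_eq_getElem l _ h

lemma hGet_mem (l : List Tri) {i : Nat} (h : i < l.length) : hGet l i ∈ l := by
  rw [hGet_eq_getElem l h]; exact List.getElem_mem h

lemma hGet_set_self (l : List Tri) {i : Nat} (a : Tri) (h : i < l.length) :
    hGet (l.set i a) i = a := by
  simp [hGet, List.getD_eq_getElem?_getD, h]

lemma hGet_set_ne (l : List Tri) {i j : Nat} (a : Tri) (h : i ≠ j) :
    hGet (l.set i a) j = hGet l j := by
  simp [hGet, List.getD_eq_getElem?_getD, List.getElem?_set_ne h]

lemma hGet_append_lt (l t : List Tri) {i : Nat} (h : i < l.length) :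
    hGet (l ++ t) i = hGet l i := by
  simp [hGet, List.getD_eq_getElem?_getD, List.getElem?_append_left h]

lemma hGet_append_self (l : List Tri) (x : Tri) : hGet (l ++ [x]) l.length = x := by
  simp [hGet, List.getD_eq_getElem?_getD]

lemma set_singleton_perm (l : List Tri) {i : Nat} (a : Tri) (h : i < l.length) :
    (l.set i a ++ [hGet l i]).Perm (l ++ [a]) := by
  rw [List.set_eq_take_cons_drop a h, hGet_eq_getElem l h]
  have hd : l.drop i = l[i] :: l.drop (i + 1) := (List.getElem_cons_drop h).symm
  have hl : l ++ [a] = l.take i ++ (l[i] :: l.drop (i + 1) ++ [a]) := by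
    rw [← hd, ← List.append_assoc, List.take_append_drop]
  rw [hl, List.append_assoc]
  refine List.Perm.append_left _ ?_
  have p1 : ((a :: l.drop (i + 1)) ++ [l[i]]).Perm (a :: (l[i] :: l.drop (i + 1))) :=
    List.Perm.cons _ (List.perm_append_singleton _ _)
  have p2 : (a :: (l[i] :: l.drop (i + 1))).Perm (l[i] :: (a :: l.drop (i + 1))) :=
    List.Perm.swap _ _ _
  have p3 : (l[i] :: (a :: l.drop (i + 1))).Perm (l[i] :: (l.drop (i + 1) ++ [a])) :=
    List.Perm.cons _ (List.perm_append_singleton _ _).symm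
  exact (p1.trans p2).trans p3

lemma two_swap_perm (l : List Tri) (x y : Tri) : (l ++ [x] ++ [y]).Perm (l ++ [y] ++ [x]) := by
  rw [List.append_assoc, List.append_assoc]
  exact List.Perm.append_left _ (List.Perm.swap _ _ _)

lemma set_set_perm (l : List Tri) {i j : Nat} (n : Tri) (hij : i ≠ j)
    (hi : i < l.length) (hj : j < l.length) :
    ((l.set i (hGet l j)).set j n).Perm (l.set i n) := by
  set c := hGet l j with hc
  have hj' : j < (l.set i c).length := by simpa using hj
  have h1 : ((l.set i c).set j n ++ [hGet (l.set i c) j]).Perm (l.set i c ++ [n]) :=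
    set_singleton_perm _ n hj'
  rw [hGet_set_ne l c hij] at h1
  have h2 : (l.set i c ++ [hGet l i]).Perm (l ++ [c]) := set_singleton_perm l c hi
  have h3 : (l.set i n ++ [hGet l i]).Perm (l ++ [n]) := set_singleton_perm l n hi
  have hL : ((l.set i c).set j n ++ [c] ++ [hGet l i]).Perm (l ++ [c] ++ [n]) :=
    ((List.Perm.append_right _ h1).trans (two_swap_perm _ _ _)).trans
      ((List.Perm.append_right _ h2).trans (List.Perm.refl _))
  have hR : (l.set i n ++ [c] ++ [hGet l i]).Perm (l ++ [c] ++ [n]) :=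
    ((two_swap_perm _ _ _).trans (List.Perm.append_right _ h3)).trans (two_swap_perm _ _ _)
  have := hL.trans hR.symm
  exact (List.perm_append_right_iff _).mp ((List.perm_append_right_iff _).mp this)

def isHeap (l : List Tri) : Prop :=
  ∀ i : Nat, 0 < i → i < l.length → tupLt (hGet l i) (hGet l ((i - 1) / 2)) = false

lemma isHeap_root_min {l : List Tri} (hh : isHeap l) :
    ∀ j, j < l.length → tupLt (hGet l j) (hGet l 0) = false := by
  intro j
  induction j using Nat.strong_induction_on with
  | _ j ih =>
    intro hj
    rcases Nat.eq_zero_or_pos j with h0 | h0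
    · subst h0; exact tupLt_irrefl _
    · have hp : (j - 1) / 2 < j := by omega
      have hple : (j - 1) / 2 < l.length := by omega
      exact notLt_trans (ih _ hp hple) (hh j h0 hj)

lemma siftdownGo_perm (pos : Nat) : ∀ (l : List Tri) (n : Tri), pos < l.length →
    (siftdownGo l 0 pos n).Perm (l.set pos n) := by
  induction pos using Nat.strong_induction_on with
  | _ pos ih =>
    intro l n hpos
    rw [siftdownGo]
    split
    · rename_i h
      split
      · rename_i hlt
        have hpp : (pos - 1) / 2 < pos := by omega
        have hpp' : (pos - 1) / 2 < (l.set pos (hGet l ((pos - 1) / 2))).length := by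
          simp; omega
        refine (ih _ hpp _ n hpp').trans ?_
        exact set_set_perm l n (by omega) hpos (by omega)
      · exact List.Perm.refl _
    · exact List.Perm.refl _

lemma siftdownGo_isHeap (pos : Nat) : ∀ (l : List Tri) (n : Tri), pos < l.length →
    (∀ i, 0 < i → i < l.length → i ≠ pos →
      tupLt (hGet (l.set pos n) i) (hGet (l.set pos n) ((i - 1) / 2)) = false) →
    (0 < pos → ∀ j, j < l.length → (j - 1) / 2 = pos →
      tupLt (hGet (l.set pos n) j) (hGet (l.set pos n) ((pos - 1) / 2)) = false) →
    isHeap (siftdownGo l 0 pos n) := by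
  induction pos using Nat.strong_induction_on with
  | _ pos ih =>
    intro l n hpos inv1 inv2
    have hlnpos : hGet (l.set pos n) pos = n := hGet_set_self l n hpos
    rw [siftdownGo]
    split
    · rename_i h
      have hppos : 0 < pos := by omega
      set pp := (pos - 1) / 2 with hppdef
      have hpp : pp < pos := by omega
      have hpplen : pp < l.length := by omega
      split
      · rename_i hlt
        -- recursive case: move parent down into pos, continue at pp
        set l₂ := l.set pos (hGet l pp) with hl2
        have hlen₂ : l₂.length = l.length := by simp [hl2]
        have key : ∀ x : Nat, x ≠ pp →
            hGet (l₂.set pp n) x = if x = pos then hGet l pp else hGet l x := by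
          intro x hx
          rw [hGet_set_ne _ n (fun hc => hx hc.symm)]
          by_cases hxp : x = pos
          · subst hxp; rw [if_pos rfl, hl2, hGet_set_self l _ hpos]
          · rw [if_neg hxp, hl2, hGet_set_ne l _ (fun hc => hxp hc.symm)]
        have keypp : hGet (l₂.set pp n) pp = n := hGet_set_self _ n (by omega)
        have hln : ∀ x : Nat, x ≠ pos → hGet (l.set pos n) x = hGet l x := by
          intro x hx; exact hGet_set_ne l n (fun hc => hx hc.symm)
        refine ih pp hpp l₂ n (by omega) ?_ ?_
        · -- inv1 for the recursive call
          intro i hi0 hilen hine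
          rw [hlen₂] at hilen
          have hpar : (i - 1) / 2 < i := by omega
          by_cases hip : i = pos
          · subst hip
            have : (i - 1) / 2 = pp := hppdef.symm
            rw [key i (by omega), this, keypp, if_pos rfl]
            exact tupLt_asymm hlt
          · have hival : hGet (l₂.set pp n) i = hGet l i := by
              rw [key i hine, if_neg hip]
            by_cases hpppar : (i - 1) / 2 = pp
            · -- parent of i is pp, whose new value is n
              rw [hival, hpppar, keypp]
              have h1 := inv1 i hi0 hilen hip
              rw [hln i hip, hpppar, hln pp (by omega)] at h1
              exact tupLt_false_of_lt_of_notLt hlt h1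
            · by_cases hpospar : (i - 1) / 2 = pos
              · -- i is a child of pos; use inv2
                rw [hival, hpospar, key pos (by omega), if_pos rfl]
                have h2 := inv2 hppos i hilen hpospar
                rw [hln i hip, hln pp (by omega)] at h2
                exact h2
              · rw [hival, key _ hpppar, if_neg hpospar]
                have h1 := inv1 i hi0 hilen hip
                rw [hln i hip, hln _ hpospar] at h1
                exact h1
        · -- inv2 for the recursive call
          intro hpp0 j hjlen hjpar
          rw [hlen₂] at hjlen
          have hgp : (pp - 1) / 2 < pp := by omega
          have hgpval : hGet (l₂.set pp n) ((pp - 1) / 2) = hGet l ((pp - 1) / 2) := by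
            rw [key _ (by omega), if_neg (by omega)]
          have hppedge : tupLt (hGet l pp) (hGet l ((pp - 1) / 2)) = false := by
            have h1 := inv1 pp hpp0 hpplen (by omega)
            rw [hln pp (by omega), hln _ (by omega)] at h1
            exact h1
          by_cases hjp : j = pos
          · subst hjp
            rw [key j (by omega), if_pos rfl, hgpval]
            exact hppedge
          · have hjne : j ≠ pp := by omega
            rw [key j hjne, if_neg hjp, hgpval]
            have h1 := inv1 j (by omega) hjlen hjp
            rw [hln j hjp, hjpar, hln pp (by omega)] at h1
            exact notLt_trans hppedge h1
      · rename_i hlt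
        -- loop stops: write n at pos; heap property holds everywhere
        intro i hi0 hilen
        simp only [List.length_set] at hilen
        by_cases hip : i = pos
        · subst hip
          rw [hGet_set_self l n (by omega), ← hppdef, hGet_set_ne l n (by omega)]
          exact Bool.not_eq_true _ ▸ hlt
        · exact inv1 i hi0 hilen hip
    · rename_i h
      have hpos0 : pos = 0 := by omega
      intro i hi0 hilen
      simp only [List.length_set] at hilen
      exact inv1 i hi0 hilen (by omega)

lemma siftupGo_spec (k : Nat) : ∀ (l : List Tri) (pos : Nat) (n : Tri),
    l.length - pos ≤ k → pos < l.length →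
    (∀ i, 0 < i → i < l.length → i ≠ pos → (i - 1) / 2 ≠ pos →
      tupLt (hGet (l.set pos n) i) (hGet (l.set pos n) ((i - 1) / 2)) = false) →
    (0 < pos → ∀ j, j < l.length → (j - 1) / 2 = pos →
      tupLt (hGet (l.set pos n) j) (hGet (l.set pos n) ((pos - 1) / 2)) = false) →
    (siftupGo l pos l.length).1.length = l.length ∧
    (siftupGo l pos l.length).2 < l.length ∧
    l.length ≤ 2 * (siftupGo l pos l.length).2 + 1 ∧
    ((siftupGo l pos l.length).1.set (siftupGo l pos l.length).2 n).Perm (l.set pos n) ∧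
    (∀ i, 0 < i → i < l.length → i ≠ (siftupGo l pos l.length).2 →
      tupLt (hGet ((siftupGo l pos l.length).1.set (siftupGo l pos l.length).2 n) i)
        (hGet ((siftupGo l pos l.length).1.set (siftupGo l pos l.length).2 n) ((i - 1) / 2)) = false) ∧
    (0 < (siftupGo l pos l.length).2 → ∀ j, j < l.length → (j - 1) / 2 = (siftupGo l pos l.length).2 →
      tupLt (hGet ((siftupGo l pos l.length).1.set (siftupGo l pos l.length).2 n) j)
        (hGet ((siftupGo l pos l.length).1.set (siftupGo l pos l.length).2 n)
          (((siftupGo l pos l.length).2 - 1) / 2)) = false) := by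
  induction k with
  | zero =>
    intro l pos n hk hpos _ _
    omega
  | succ k ih =>
    intro l pos n hk hpos J1 J2
    by_cases h : 2 * pos + 1 < l.length
    · -- recursive case
      set c := siftupChild l pos l.length with hcdef
      have hcrange : pos < c ∧ c < l.length ∧ ((c - 1) / 2 = pos) := by
        rw [hcdef]; unfold siftupChild; split <;> omega
      obtain ⟨hposc, hclen, hcpar⟩ := hcrange
      have hcne : c ≠ pos := by omega
      set l₂ := l.set pos (hGet l c) with hl2
      have hlen₂ : l₂.length = l.length := by simp [hl2]
      have hstep : siftupGo l pos l.length = siftupGo l₂ c l.length := by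
        rw [siftupGo]; rw [dif_pos h]
      have key : ∀ x : Nat, x ≠ c →
          hGet (l₂.set c n) x = if x = pos then hGet l c else hGet l x := by
        intro x hx
        rw [hGet_set_ne _ n (fun hc => hx hc.symm)]
        by_cases hxp : x = pos
        · subst hxp; rw [if_pos rfl, hl2, hGet_set_self l _ hpos]
        · rw [if_neg hxp, hl2, hGet_set_ne l _ (fun hc => hxp hc.symm)]
      have keyc : hGet (l₂.set c n) c = n := hGet_set_self _ n (by omega)
      have hln : ∀ x : Nat, x ≠ pos → hGet (l.set pos n) x = hGet l x := by
        intro x hx; exact hGet_set_ne l n (fun hc => hx hc.symm)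
      have J1₂ : ∀ i, 0 < i → i < l₂.length → i ≠ c → (i - 1) / 2 ≠ c →
          tupLt (hGet (l₂.set c n) i) (hGet (l₂.set c n) ((i - 1) / 2)) = false := by
        intro i hi0 hilen hic hipc
        rw [hlen₂] at hilen
        by_cases hip : i = pos
        · subst hip
          have hppos : 0 < i := hi0
          have hpine : (i - 1) / 2 ≠ i := by omega
          have hpinec : (i - 1) / 2 ≠ c := by omega
          rw [key i hic, if_pos rfl, key _ hpinec, if_neg (by omega)]
          have h2 := J2 hi0 c hclen hcpar
          rw [hln c hcne, hln _ (by omega)] at h2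
          exact h2
        · rw [key i hic, if_neg hip]
          by_cases hpp : (i - 1) / 2 = pos
          · -- i is the sibling of c
            rw [hpp, key pos (by omega), if_pos rfl]
            have hi12 : i = 2 * pos + 1 ∨ i = 2 * pos + 2 := by omega
            have hc12 : c = 2 * pos + 1 ∨ c = 2 * pos + 2 := by omega
            rw [hcdef] at hic ⊢
            unfold siftupChild at hic ⊢
            split at hic
            · rename_i hcond
              have : i = 2 * pos + 1 := by omega
              subst this
              rw [if_pos hcond]
              exact hcond.2
            · rename_i hcond
              have : i = 2 * pos + 2 := by omega
              subst this
              rw [if_neg hcond]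
              have : tupLt (hGet l (2 * pos + 1)) (hGet l (2 * pos + 2)) = true := by
                rcases Bool.eq_false_or_eq_true (tupLt (hGet l (2 * pos + 1)) (hGet l (2 * pos + 2))) with ht | hf
                · exact ht
                · exact absurd ⟨by omega, hf⟩ hcond
              exact tupLt_asymm this
          · rw [key _ hipc, if_neg hpp]
            have h1 := J1 i hi0 hilen hip hpp
            rw [hln i hip, hln _ hpp] at h1
            exact h1
      have J2₂ : 0 < c → ∀ j, j < l₂.length → (j - 1) / 2 = c →
          tupLt (hGet (l₂.set c n) j) (hGet (l₂.set c n) ((c - 1) / 2)) = false := by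
        intro _ j hjlen hjpar
        rw [hlen₂] at hjlen
        have hjc : j ≠ c := by omega
        have hjpos : j ≠ pos := by omega
        rw [key j hjc, if_neg hjpos, hcpar, key pos (by omega), if_pos rfl]
        have h1 := J1 j (by omega) hjlen hjpos (by omega)
        rw [hln j hjpos, hjpar, hln c hcne] at h1
        exact h1
      have ihr := ih l₂ c n (by rw [hlen₂]; omega) (by rw [hlen₂]; omega) J1₂ J2₂
      rw [hlen₂] at ihr
      obtain ⟨e1, e2, e3, e4, e5, e6⟩ := ihr
      rw [hstep]
      refine ⟨e1, e2, e3, ?_, e5, e6⟩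
      refine e4.trans ?_
      rw [hl2]
      exact set_set_perm l n (by omega) hpos hclen
    · -- leaf: no children below endpos
      have hstep : siftupGo l pos l.length = (l, pos) := by
        rw [siftupGo]; rw [dif_neg h]
      rw [hstep]
      refine ⟨rfl, hpos, by omega, List.Perm.refl _, ?_, J2⟩
      intro i hi0 hilen hip
      by_cases hpp : (i - 1) / 2 = pos
      · omega
      · exact J1 i hi0 hilen hip hpp

lemma siftup_zero_spec (l : List Tri) (hne : l ≠ [])
    (hx : ∀ i, 0 < i → i < l.length → (i - 1) / 2 ≠ 0 →
      tupLt (hGet l i) (hGet l ((i - 1) / 2)) = false) :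
    (siftup l 0).Perm l ∧ isHeap (siftup l 0) := by
  have hlen : 0 < l.length := List.length_pos_of_ne_nil hne
  have hset0 : l.set 0 (hGet l 0) = l := by
    cases l with
    | nil => rfl
    | cons a t => rfl
  have hspec := siftupGo_spec l.length l 0 (hGet l 0) (by omega) hlen
    (by rw [hset0]; intro i hi0 hilen _ hpp; exact hx i hi0 hilen hpp)
    (by omega)
  obtain ⟨e1, e2, e3, e4, e5, e6⟩ := hspec
  rw [hset0] at e4
  set r := siftupGo l 0 l.length with hr
  have hrlen : r.2 < (r.1.set r.2 (hGet l 0)).length := by simp [e1]; omega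
  have hsetset : (r.1.set r.2 (hGet l 0)).set r.2 (hGet l 0) = r.1.set r.2 (hGet l 0) :=
    List.set_set _
  have hunfold : siftup l 0 = siftdownGo (r.1.set r.2 (hGet l 0)) 0 r.2 (hGet l 0) := rfl
  constructor
  · rw [hunfold]
    exact (siftdownGo_perm r.2 _ _ hrlen).trans (by rw [hsetset]; exact e4)
  · rw [hunfold]
    refine siftdownGo_isHeap r.2 _ _ hrlen ?_ ?_
    · intro i hi0 hilen hir
      rw [hsetset]
      simp only [List.length_set, e1] at hilen
      exact e5 i hi0 hilen hir
    · intro hr0 j hjlen hjpar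
      rw [hsetset]
      simp only [List.length_set, e1] at hjlen
      exact e6 hr0 j hjlen hjpar

lemma heappush_spec (l : List Tri) (x : Tri) (hh : isHeap l) :
    (heappush l x).Perm (x :: l) ∧ isHeap (heappush l x) := by
  have hgx : hGet (l ++ [x]) l.length = x := hGet_append_self l x
  have hlen : l.length < (l ++ [x]).length := by simp
  have hset : (l ++ [x]).set l.length x = l ++ [x] := by simp
  have hunfold : heappush l x = siftdownGo (l ++ [x]) 0 l.length (hGet (l ++ [x]) l.length) := rfl
  rw [hunfold, hgx]
  constructor
  · exact (siftdownGo_perm l.length _ x hlen).trans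
      (by rw [hset]; exact List.perm_append_singleton x l)
  · refine siftdownGo_isHeap l.length _ x hlen ?_ ?_
    · intro i hi0 hilen hine
      rw [hset]
      simp only [List.length_append, List.length_singleton] at hilen
      have hi : i < l.length := by omega
      have hp : (i - 1) / 2 < l.length := by omega
      rw [hGet_append_lt l [x] hi, hGet_append_lt l [x] hp]
      exact hh i hi0 hi
    · intro h0 j hjlen hjpar
      simp only [List.length_append, List.length_singleton] at hjlen
      omega

lemma hGet_zero_cons (a : Tri) (t : List Tri) : hGet (a :: t) 0 = a := rfl

lemma heappop_spec (l : List Tri) (hne : l ≠ []) (hh : isHeap l) :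
    (heappop l).1 = hGet l 0 ∧ l.Perm ((heappop l).1 :: (heappop l).2) ∧ isHeap (heappop l).2 := by
  have hlen : 0 < l.length := List.length_pos_of_ne_nil hne
  have hlast : hGet l (l.length - 1) = l.getLast hne := by
    rw [hGet_eq_getElem l (by omega), List.getLast_eq_getElem hne]
  have hdl : l.dropLast ++ [l.getLast hne] = l := List.dropLast_concat_getLast hne
  by_cases hempty : l.dropLast.isEmpty
  · have hd : l.dropLast = [] := by simpa [List.isEmpty_iff] using hempty
    cases l with
    | nil => exact absurd rfl hne
    | cons a t =>
      cases t with
      | nil =>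
        refine ⟨rfl, List.Perm.refl _, ?_⟩
        intro i hi0 hilen
        simp [heappop] at hilen
      | cons b t' => simp at hd
  · have hd : l.dropLast ≠ [] := by simpa [List.isEmpty_iff] using hempty
    obtain ⟨r0, t, hrt⟩ := List.exists_cons_of_ne_nil hd
    have hunfold : heappop l =
        (hGet l.dropLast 0, siftup (l.dropLast.set 0 (hGet l (l.length - 1))) 0) := by
      rw [heappop, if_neg hempty]
    have hdllen : l.dropLast.length = l.length - 1 := by simp
    have hg0 : hGet l.dropLast 0 = hGet l 0 := by
      conv_rhs => rw [← hdl]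
      rw [hGet_append_lt _ _ (by rw [hrt]; simp)]
    have hsetne : l.dropLast.set 0 (hGet l (l.length - 1)) ≠ [] := by
      apply List.ne_nil_of_length_pos
      rw [List.length_set, hrt]
      simp
    have hsiftup := siftup_zero_spec (l.dropLast.set 0 (hGet l (l.length - 1))) hsetne ?_
    · obtain ⟨hperm, hheap⟩ := hsiftup
      rw [hunfold]
      refine ⟨hg0, ?_, hheap⟩
      simp only []
      have hchain : l.Perm (hGet l.dropLast 0 :: (l.dropLast.set 0 (hGet l (l.length - 1)))) := by
        conv_lhs => rw [← hdl]
        rw [hrt, hlast, hGet_zero_cons, List.set_cons_zero]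
        exact List.Perm.cons r0 (List.perm_append_singleton _ t)
      exact hchain.trans (List.Perm.cons _ hperm.symm)
    · -- heap property except below the root, for dropLast with the root overwritten
      intro i hi0 hilen hpp
      have hilen' : i < l.dropLast.length := by simpa using hilen
      have hival : hGet (l.dropLast.set 0 (hGet l (l.length - 1))) i = hGet l i := by
        rw [hGet_set_ne _ _ (by omega)]
        conv_rhs => rw [← hdl]
        rw [hGet_append_lt _ _ hilen']
      have hpval : hGet (l.dropLast.set 0 (hGet l (l.length - 1))) ((i - 1) / 2) =
          hGet l ((i - 1) / 2) := by
        rw [hGet_set_ne _ _ (by omega)]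
        conv_rhs => rw [← hdl]
        rw [hGet_append_lt _ _ (by rw [hdllen]; omega)]
      rw [hival, hpval]
      exact hh i hi0 (by omega)

-- min(frontier): the running fold keeps a minimal element
lemma foldMin_spec (t : List Tri) : ∀ a : Tri,
    (t.foldl (fun m x => if tupLt x m then x else m) a ∈ a :: t) ∧
    (∀ x ∈ a :: t, tupLt x (t.foldl (fun m x => if tupLt x m then x else m) a) = false) := by
  induction t with
  | nil =>
    intro a
    refine ⟨List.mem_singleton.mpr rfl, ?_⟩
    intro x hx
    rw [List.mem_singleton.mp hx]
    exact tupLt_irrefl _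
  | cons y t ih =>
    intro a
    rw [List.foldl_cons]
    set a' := if tupLt y a then y else a with ha'
    obtain ⟨ihmem, ihmin⟩ := ih a'
    have hmem : t.foldl (fun m x => if tupLt x m then x else m) a' ∈ a :: y :: t := by
      rcases List.mem_cons.mp ihmem with heq | hmem
      · rw [heq, ha']
        split
        · exact List.mem_cons_of_mem _ (List.mem_cons_self)
        · exact List.mem_cons_self
      · exact List.mem_cons_of_mem _ (List.mem_cons_of_mem _ hmem)
    refine ⟨hmem, ?_⟩
    have ha'min : tupLt a' (t.foldl (fun m x => if tupLt x m then x else m) a') = false :=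
      ihmin a' List.mem_cons_self
    intro x hx
    rcases List.mem_cons.mp hx with hxa | hx'
    · subst hxa
      have haa' : tupLt x a' = false := by
        rw [ha']
        split
        · exact tupLt_asymm (by assumption)
        · exact tupLt_irrefl _
      exact notLt_trans ha'min haa'
    · rcases List.mem_cons.mp hx' with hxy | hxt
      · subst hxy
        have hya' : tupLt x a' = false := by
          rw [ha']
          split
          · exact tupLt_irrefl _
          · rename_i hcond
            exact Bool.not_eq_true _ ▸ hcond
        exact notLt_trans ha'min hya'
      · exact ihmin x (List.mem_cons_of_mem _ hxt)

lemma bMin_spec (fr : List Tri) (hne : fr ≠ []) :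
    bMin fr ∈ fr ∧ ∀ x ∈ fr, tupLt x (bMin fr) = false := by
  cases fr with
  | nil => exact absurd rfl hne
  | cons h t => exact foldMin_spec t h

lemma mem_heap_notLt_root {heap : List Tri} (hheap : isHeap heap) {x : Tri} (hx : x ∈ heap) :
    tupLt x (hGet heap 0) = false := by
  obtain ⟨i, hi, rfl⟩ := List.mem_iff_getElem.mp hx
  rw [← hGet_eq_getElem heap hi]
  exact isHeap_root_min hheap i hi

-- the heap's pop and the frontier's min()/remove() extract the SAME element and leave
-- permutation-equal pools
lemma heap_min_eq (heap fr : List Tri) (hperm : heap.Perm fr) (hheap : isHeap heap)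
    (hfe : fr ≠ []) :
    heap ≠ [] ∧
    (heappop heap).1 = bMin fr ∧
    (heappop heap).2.Perm (fr.erase (bMin fr)) ∧
    isHeap (heappop heap).2 ∧
    PySem.List.remove? fr (bMin fr) = some (fr.erase (bMin fr)) := by
  have hne' : heap ≠ [] := by
    intro h
    rw [h] at hperm
    exact hfe (List.Perm.eq_nil hperm.symm)
  obtain ⟨hmem, hmin⟩ := bMin_spec fr hfe
  obtain ⟨hm, hp, hh'⟩ := heappop_spec heap hne' hheap
  have h1 : tupLt (bMin fr) (hGet heap 0) = false :=
    mem_heap_notLt_root hheap (hperm.mem_iff.mpr hmem)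
  have hrootmem : hGet heap 0 ∈ fr :=
    hperm.mem_iff.mp (hGet_mem heap (List.length_pos_of_ne_nil hne'))
  have h2 : tupLt (hGet heap 0) (bMin fr) = false := hmin _ hrootmem
  have heq : bMin fr = hGet heap 0 := tupLt_eq_of_notLt_of_notLt h1 h2
  have hpopm : (heappop heap).1 = bMin fr := by rw [hm, heq]
  refine ⟨hne', hpopm, ?_, hh', PySem.List.remove?_eq_some_erase fr (bMin fr) hmem⟩
  have hfr : fr.Perm (bMin fr :: fr.erase (bMin fr)) := List.perm_cons_erase hmem
  have hcons : ((heappop heap).1 :: (heappop heap).2).Perm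
      (bMin fr :: fr.erase (bMin fr)) := hp.symm.trans (hperm.trans hfr)
  rw [hpopm] at hcons
  exact List.Perm.cons_inv hcons

-- single neighbour processing step, shared shape of A's and B's inner loops (proof-only defs)
def stepA (A : List (List Int)) (st : PySem.Set (Int × Int) × List Tri) (p : Int × Int) :
    PySem.Set (Int × Int) × List Tri :=
  if 0 ≤ p.1 ∧ p.1 < (A.length : Int) ∧ 0 ≤ p.2 ∧ p.2 < ((A.headD []).length : Int)
      ∧ ¬ ((p.1, p.2) ∈ st.1) then
    (PySem.Set.add st.1 (p.1, p.2), heappush st.2 (-(aGrid A p.1 p.2), p.1, p.2))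
  else st

def stepB (A : List (List Int)) (st : PySem.Set (Int × Int) × List Tri) (p : Int × Int) :
    PySem.Set (Int × Int) × List Tri :=
  if 0 ≤ p.1 ∧ p.1 < (A.length : Int) ∧ 0 ≤ p.2 ∧ p.2 < ((A.headD []).length : Int)
      ∧ ¬ ((p.1, p.2) ∈ st.1) then
    (PySem.Set.add st.1 (p.1, p.2), st.2 ++ [(-(bGrid A p.1 p.2), p.1, p.2)])
  else st

lemma aStep_eq_foldl (A : List (List Int)) (r c : Int) (st : PySem.Set (Int × Int) × List Tri) :
    aStep A r c st = ([(r - 1, c), (r, c + 1), (r + 1, c), (r, c - 1)]).foldl (stepA A) st := by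
  show ([((-1 : Int), (0 : Int)), (0, 1), (1, 0), (0, -1)]).foldl
      (fun st dd => stepA A st (r + dd.1, c + dd.2)) st = _
  simp only [List.foldl_cons, List.foldl_nil, add_zero, sub_eq_add_neg]

lemma bStep_eq_foldl (A : List (List Int)) (r c : Int) (st : PySem.Set (Int × Int) × List Tri) :
    bStep A r c st = ([(r - 1, c), (r, c + 1), (r + 1, c), (r, c - 1)]).foldl (stepB A) st := rfl

lemma fold_bisim (A : List (List Int)) : ∀ (coords : List (Int × Int))
    (vis : PySem.Set (Int × Int)) (heap fr : List Tri),
    heap.Perm fr → isHeap heap →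
    (coords.foldl (stepA A) (vis, heap)).1 = (coords.foldl (stepB A) (vis, fr)).1 ∧
    (coords.foldl (stepA A) (vis, heap)).2.Perm (coords.foldl (stepB A) (vis, fr)).2 ∧
    isHeap (coords.foldl (stepA A) (vis, heap)).2 := by
  intro coords
  induction coords with
  | nil => exact fun vis heap fr hperm hheap => ⟨rfl, hperm, hheap⟩
  | cons p cs ihc =>
    intro vis heap fr hperm hheap
    rw [List.foldl_cons, List.foldl_cons]
    by_cases hcond : 0 ≤ p.1 ∧ p.1 < (A.length : Int) ∧ 0 ≤ p.2
        ∧ p.2 < ((A.headD []).length : Int) ∧ ¬ ((p.1, p.2) ∈ vis)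
    · rw [show stepA A (vis, heap) p = (PySem.Set.add vis (p.1, p.2),
          heappush heap (-(aGrid A p.1 p.2), p.1, p.2)) from by rw [stepA, if_pos hcond],
        show stepB A (vis, fr) p = (PySem.Set.add vis (p.1, p.2),
          fr ++ [(-(bGrid A p.1 p.2), p.1, p.2)]) from by rw [stepB, if_pos hcond]]
      obtain ⟨hpush, hpushheap⟩ := heappush_spec heap (-(aGrid A p.1 p.2), p.1, p.2) hheap
      refine ihc _ _ _ ?_ hpushheap
      have hab : aGrid A p.1 p.2 = bGrid A p.1 p.2 := rfl
      rw [hab] at hpush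
      exact hpush.trans ((List.Perm.cons _ hperm).trans (List.perm_append_singleton _ _).symm)
    · rw [show stepA A (vis, heap) p = (vis, heap) from by rw [stepA, if_neg hcond],
        show stepB A (vis, fr) p = (vis, fr) from by rw [stepB, if_neg hcond]]
      exact ihc _ _ _ hperm hheap

lemma loop_bisim (A : List (List Int)) (fuel : Nat) :
    ∀ (vis : PySem.Set (Int × Int)) (m : Int) (heap fr : List Tri),
    heap.Perm fr → isHeap heap →
    aLoop A fuel vis (some m) heap = some (bLoop A fuel vis m fr) := by
  induction fuel with
  | zero => intro vis m heap fr _ _; rfl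
  | succ fuel ih =>
    intro vis m heap fr hperm hheap
    by_cases hfe : fr = []
    · subst hfe
      have : heap = [] := List.Perm.eq_nil hperm
      subst this
      rfl
    · obtain ⟨hne', hpopm, hpopperm, hpopheap, hrem⟩ := heap_min_eq heap fr hperm hheap hfe
      have hHisE : heap.isEmpty = false := List.isEmpty_eq_false_iff.mpr hne'
      have hFisE : fr.isEmpty = false := List.isEmpty_eq_false_iff.mpr hfe
      rw [aLoop, bLoop]
      simp only [hHisE, hFisE, Bool.false_eq_true, if_false, hrem, Option.getD_some, hpopm]
      rw [min_comm]
      by_cases hret : (bMin fr).2.1 = (A.length : Int) - 1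
          ∧ (bMin fr).2.2 = ((A.headD []).length : Int) - 1
      · rw [if_pos hret, if_pos hret]
      · rw [if_neg hret, if_neg hret]
        rw [aStep_eq_foldl, bStep_eq_foldl]
        obtain ⟨hv, hpm, hhp⟩ := fold_bisim A
          [((bMin fr).2.1 - 1, (bMin fr).2.2), ((bMin fr).2.1, (bMin fr).2.2 + 1),
           ((bMin fr).2.1 + 1, (bMin fr).2.2), ((bMin fr).2.1, (bMin fr).2.2 - 1)]
          vis (heappop heap).2 (fr.erase (bMin fr)) hpopperm hpopheap
        rw [ih _ _ _ _ hpm hhp, hv]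

-- ===== VERDICT (by name: the statement is the Claim_ definition above) =====
theorem maximumMinimumPath_spec : Claim_equal_maximumMinimumPath := by
  intro A _ _
  unfold Spec_maximumMinimumPath maximumMinimumPath maximumMinimumPath_alt
  -- unroll the first iteration of both loops: the pool is the singleton start cell
  have hab : aGrid A 0 0 = bGrid A 0 0 := rfl
  rw [hab]
  rw [aLoop, bLoop]
  have hE : (([(-(bGrid A 0 0), (0 : Int), (0 : Int))] : List Tri)).isEmpty = false := rfl
  simp only [hE, Bool.false_eq_true, if_false]
  have hpop : heappop [(-(bGrid A 0 0), (0 : Int), (0 : Int))]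
      = ((-(bGrid A 0 0), (0 : Int), (0 : Int)), []) := rfl
  have hbmin : bMin [(-(bGrid A 0 0), (0 : Int), (0 : Int))]
      = (-(bGrid A 0 0), (0 : Int), (0 : Int)) := rfl
  have hrem : PySem.List.remove? [(-(bGrid A 0 0), (0 : Int), (0 : Int))]
      (-(bGrid A 0 0), (0 : Int), (0 : Int)) = some [] :=
    PySem.List.remove?_cons_self _ _
  simp only [hpop, hbmin, hrem, Option.getD_some, neg_neg, min_self]
  by_cases hret : (0 : Int) = (A.length : Int) - 1 ∧ (0 : Int) = ((A.headD []).length : Int) - 1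
  · rw [if_pos hret, if_pos hret]; rfl
  · rw [if_neg hret, if_neg hret]
    rw [aStep_eq_foldl, bStep_eq_foldl]
    obtain ⟨hv, hpm, hhp⟩ := fold_bisim A
      [((0 : Int) - 1, (0 : Int)), (0, 0 + 1), (0 + 1, 0), (0, 0 - 1)]
      (PySem.Set.add PySem.Set.empty ((0 : Int), (0 : Int))) [] [] (List.Perm.refl _)
      (by intro i hi0 hilen; simp at hilen)
    rw [loop_bisim A _ _ _ _ _ hpm hhp, hv, Option.getD_some]
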